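-- pv_equiv track=rewrite | github.com/CrealityOfficial/CrealityPrint | cmake/python/createUtil.py | collect_unique_libs
-- ===== SOURCE A (Python) =====
-- def collect_unique_libs(subs, libs):
--     result = []
--
--     first = libs;
--     second = []
--     while len(first) > 0:
--         for value in first:
--             if value not in result:
--                 result.append(value)
--                 if value in subs:
--                     nex = subs[value]
--                     for nvalue in  nex:
--                         if nvalue not in second:
--                             second.append(nvalue)
--
--         first = second
--         second = []
--
--     return result
-- ===== SOURCE B (Python) =====
-- from collections import deque
--
-- def collect_unique_libs(subs, libs):
--     result = []
--     queue = deque(libs)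
--     while queue:
--         value = queue.popleft()
--         if value not in result:
--             result.append(value)
--             queue.extend(subs.get(value, []))
--     return result
-- ===== Notes on version B (the rewrite author's own statement) =====
-- stated objective: simpler
-- what changed: Replaced the two-frontier layered while/for/for loop with a single FIFO queue (collections.deque) loop that pops a value, appends it to the result if unseen, and enqueues its children; first-encounter BFS order is preserved.
import Mathlib
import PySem

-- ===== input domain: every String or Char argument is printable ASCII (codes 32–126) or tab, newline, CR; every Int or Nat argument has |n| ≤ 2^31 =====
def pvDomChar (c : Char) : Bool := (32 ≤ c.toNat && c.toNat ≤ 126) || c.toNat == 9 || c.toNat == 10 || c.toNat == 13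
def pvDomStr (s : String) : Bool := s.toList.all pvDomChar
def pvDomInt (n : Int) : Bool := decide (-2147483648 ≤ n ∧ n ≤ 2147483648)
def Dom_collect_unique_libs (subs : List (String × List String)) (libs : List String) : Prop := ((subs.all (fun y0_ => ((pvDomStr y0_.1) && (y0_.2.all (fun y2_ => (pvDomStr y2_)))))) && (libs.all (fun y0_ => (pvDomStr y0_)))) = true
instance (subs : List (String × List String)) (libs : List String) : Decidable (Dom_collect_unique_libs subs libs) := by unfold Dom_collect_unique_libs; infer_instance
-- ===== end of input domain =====

-- B replaces A's nested two-frontier layer loop by a single FIFO-queue loop (simpler decomposition, same values).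
-- Both Lean ports use a fuel counter solely as a totality guard; the proofs show the fuel is never exhausted.

-- ===== PORT A =====
-- shared totality bound: total number of strings in subs' value lists
def pvSubTotal (subs : List (String × List String)) : Nat :=
  (subs.map (fun p => p.2.length)).sum

-- inner 'for nvalue in nex: if nvalue not in second: second.append(nvalue)'
def pvAddNew (sec : List String) (nex : List String) : List String :=
  nex.foldl (fun s n => if n ∈ s then s else s ++ [n]) sec

-- body of 'for value in first: …' acting on the state (result, second);
-- 'value in subs' + 'subs[value]' = first-match association-list lookup (match on List.lookup)
def pvStepA (subs : List (String × List String)) (st : List String × List String) (value : String) :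
    List String × List String :=
  if value ∈ st.1 then st
  else
    match List.lookup value subs with
    | some nex => (st.1 ++ [value], pvAddNew st.2 nex)
    | none => (st.1 ++ [value], st.2)

-- 'while len(first) > 0: …' (fuel is only a totality guard)
def pvRunA (subs : List (String × List String)) : Nat → List String → List String → List String
  | 0, res, _ => res
  | f + 1, res, first =>
    if first.isEmpty then res
    else
      let st := first.foldl (pvStepA subs) (res, [])
      pvRunA subs f st.1 st.2

def collect_unique_libs (subs : List (String × List String)) (libs : List String) : List String :=
  pvRunA subs (libs.length + pvSubTotal subs + 2) [] libs

-- ===== PORT B =====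
-- 'while queue: value = queue.popleft(); if value not in result: result.append(value); queue.extend(subs.get(value, []))'
def pvRunB (subs : List (String × List String)) : Nat → List String → List String → List String
  | 0, res, _ => res
  | _ + 1, res, [] => res
  | f + 1, res, v :: q =>
    if v ∈ res then pvRunB subs f res q
    else pvRunB subs f (res ++ [v]) (q ++ (List.lookup v subs).getD [])

def collect_unique_libs_alt (subs : List (String × List String)) (libs : List String) : List String :=
  pvRunB subs ((pvSubTotal subs + 1) * (libs.length + pvSubTotal subs + 1) + libs.length + 1) [] libs

-- ===== PRECONDITION & SPEC =====
def Spec_collect_unique_libs (subs : List (String × List String)) (libs : List String) (out : List String) : Prop := out = collect_unique_libs_alt subs libs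
instance (subs : List (String × List String)) (libs : List String) (out : List String) : Decidable (Spec_collect_unique_libs subs libs out) := by unfold Spec_collect_unique_libs; infer_instance

-- ===== CLAIM (what is proved, stated in full; the proofs are below) =====
def Claim_equal_collect_unique_libs : Prop := ∀ (subs : List (String × List String)) (libs : List String), Dom_collect_unique_libs subs libs → Spec_collect_unique_libs subs libs (collect_unique_libs subs libs)

-- ===== LEMMAS AND PROOFS =====

-- universe of all strings that can ever be enqueued
def pvU (subs : List (String × List String)) (libs : List String) : Finset String :=
  (libs ++ subs.flatMap (fun p => p.2)).toFinset

-- every queue element lies in the universe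
def pvInv (subs : List (String × List String)) (libs : List String) (q : List String) : Prop :=
  ∀ v ∈ q, v ∈ pvU subs libs

-- termination measure for B's queue loop
def pvM (subs : List (String × List String)) (libs : List String) (res q : List String) : Nat :=
  q.length + (pvSubTotal subs + 1) * ((pvU subs libs) \ res.toFinset).card

theorem pv_lookup_mem_snd (subs : List (String × List String)) (v : String) (l : List String)
    (h : List.lookup v subs = some l) : l ∈ subs.map Prod.snd := by
  induction subs with
  | nil => simp [List.lookup] at h
  | cons p rest ih =>
    rw [List.lookup] at h
    by_cases hv : v == p.1
    · simp [hv] at h; simp [← h]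
    · simp [hv] at h; simp [ih h]

theorem pv_ch_len_le (subs : List (String × List String)) (v : String) :
    ((List.lookup v subs).getD []).length ≤ pvSubTotal subs := by
  cases h : List.lookup v subs with
  | none => simp [pvSubTotal]
  | some l =>
    have hm := pv_lookup_mem_snd subs v l h
    have : l.length ∈ subs.map (fun p => p.2.length) := by
      simp only [List.mem_map] at hm ⊢
      obtain ⟨p, hp, rfl⟩ := hm; exact ⟨p, hp, rfl⟩
    simpa [pvSubTotal] using List.single_le_sum (by intro x _; exact Nat.zero_le x) _ this

theorem pv_ch_mem_U (subs : List (String × List String)) (libs : List String) (v n : String)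
    (h : n ∈ (List.lookup v subs).getD []) : n ∈ pvU subs libs := by
  cases hl : List.lookup v subs with
  | none => simp [hl] at h
  | some l =>
    rw [hl] at h; simp only [Option.getD_some] at h
    have hm := pv_lookup_mem_snd subs v l hl
    simp only [List.mem_map] at hm
    obtain ⟨p, hp, rfl⟩ := hm
    simp only [pvU, List.mem_toFinset, List.mem_append, List.mem_flatMap]
    exact Or.inr ⟨p, hp, h⟩

theorem pv_runB_nil (subs : List (String × List String)) (f : Nat) (res : List String) :
    pvRunB subs f res [] = res := by cases f <;> rfl

theorem pvM_cons (subs : List (String × List String)) (libs : List String) (res : List String)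
    (v : String) (q : List String) :
    pvM subs libs res (v :: q) = pvM subs libs res q + 1 := by
  simp [pvM]; omega

theorem pvM_fresh (subs : List (String × List String)) (libs : List String) (res : List String)
    (v : String) (q : List String) (hv : v ∈ pvU subs libs) (hres : v ∉ res) :
    pvM subs libs (res ++ [v]) (q ++ (List.lookup v subs).getD []) + 2 ≤
      pvM subs libs res (v :: q) := by
  have hcard : ((pvU subs libs) \ (res ++ [v]).toFinset).card + 1
      = ((pvU subs libs) \ res.toFinset).card := by
    have h1 : (res ++ [v]).toFinset = insert v res.toFinset := by
      simp [List.toFinset_append]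
    rw [h1, Finset.sdiff_insert]
    exact Finset.card_erase_add_one (by simp [Finset.mem_sdiff, hv, hres])
  have hch := pv_ch_len_le subs v
  set S := pvSubTotal subs with hS
  set c := ((pvU subs libs) \ res.toFinset).card with hc
  set c' := ((pvU subs libs) \ (res ++ [v]).toFinset).card with hc'
  have hcc : c = c' + 1 := hcard.symm
  simp only [pvM, List.length_append, List.length_cons, ← hS, ← hc, ← hc', hcc]
  have hmul : (S + 1) * (c' + 1) = (S + 1) * c' + S + 1 := by ring
  omega

-- fuel irrelevance: any two sufficient fuels give the same result
theorem pv_runB_agree (subs : List (String × List String)) (libs : List String) :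
    ∀ (f g : Nat) (res q : List String), pvInv subs libs q →
      pvM subs libs res q ≤ f → pvM subs libs res q ≤ g →
      pvRunB subs f res q = pvRunB subs g res q := by
  intro f
  induction f with
  | zero =>
    intro g res q _ hf _
    have : q = [] := by
      cases q with
      | nil => rfl
      | cons v q' => exfalso; simp [pvM] at hf
    subst this; rw [pv_runB_nil, pv_runB_nil]
  | succ f ih =>
    intro g res q hinv hf hg
    cases q with
    | nil => rw [pv_runB_nil, pv_runB_nil]
    | cons v q' =>
      have hm1 : 1 ≤ pvM subs libs res (v :: q') := by simp [pvM]; omega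
      obtain ⟨g', rfl⟩ : ∃ g', g = g' + 1 := ⟨g - 1, by omega⟩
      rw [pvRunB, pvRunB]
      by_cases hv : v ∈ res
      · simp only [hv, if_true]
        exact ih g' res q' (fun x hx => hinv x (List.mem_cons_of_mem _ hx))
          (by rw [pvM_cons] at hf; omega) (by rw [pvM_cons] at hg; omega)
      · simp only [hv, if_false]
        have hvU : v ∈ pvU subs libs := hinv v (List.mem_cons_self ..)
        have hstep := pvM_fresh subs libs res v q' hvU hv
        refine ih g' (res ++ [v]) (q' ++ (List.lookup v subs).getD [])
          ?_ (by omega) (by omega)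
        intro x hx
        rcases List.mem_append.mp hx with h | h
        · exact hinv x (List.mem_cons_of_mem _ h)
        · exact pv_ch_mem_U subs libs v x h

-- a queue element that already occurs earlier (in the queue or in the result) can be dropped
theorem pv_runB_dup (subs : List (String × List String)) (libs : List String) :
    ∀ (xs : List String) (f g : Nat) (res ys : List String) (v : String),
      pvInv subs libs (xs ++ v :: ys) → (v ∈ res ∨ v ∈ xs) →
      pvM subs libs res (xs ++ v :: ys) ≤ f → pvM subs libs res (xs ++ ys) ≤ g →
      pvRunB subs f res (xs ++ v :: ys) = pvRunB subs g res (xs ++ ys) := by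
  intro xs
  induction xs with
  | nil =>
    intro f g res ys v hinv hv hf hg
    simp only [List.nil_append] at hinv hf hg ⊢
    have hvres : v ∈ res := by
      rcases hv with h | h
      · exact h
      · simp at h
    have hm1 : 1 ≤ pvM subs libs res (v :: ys) := by simp [pvM]; omega
    obtain ⟨f', rfl⟩ : ∃ f', f = f' + 1 := ⟨f - 1, by omega⟩
    rw [pvRunB]
    simp only [hvres, if_true]
    exact pv_runB_agree subs libs f' g res ys
      (fun x hx => hinv x (List.mem_cons_of_mem _ hx))
      (by rw [pvM_cons] at hf; omega) hg
  | cons x xs' ih =>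
    intro f g res ys v hinv hv hf hg
    simp only [List.cons_append] at hinv hf hg ⊢
    have hm1 : 1 ≤ pvM subs libs res (x :: (xs' ++ v :: ys)) := by simp [pvM]; omega
    have hm2 : 1 ≤ pvM subs libs res (x :: (xs' ++ ys)) := by simp [pvM]; omega
    obtain ⟨f', rfl⟩ : ∃ f', f = f' + 1 := ⟨f - 1, by omega⟩
    obtain ⟨g', rfl⟩ : ∃ g', g = g' + 1 := ⟨g - 1, by omega⟩
    rw [pvRunB, pvRunB]
    have hinv' : pvInv subs libs (xs' ++ v :: ys) :=
      fun z hz => hinv z (List.mem_cons_of_mem _ hz)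
    by_cases hx : x ∈ res
    · simp only [hx, if_true]
      have hv' : v ∈ res ∨ v ∈ xs' := by
        rcases hv with h | h
        · exact Or.inl h
        · rcases List.mem_cons.mp h with rfl | h'
          · exact Or.inl hx
          · exact Or.inr h'
      exact ih f' g' res ys v hinv' hv'
        (by rw [pvM_cons] at hf; omega) (by rw [pvM_cons] at hg; omega)
    · simp only [hx, if_false]
      have hxU : x ∈ pvU subs libs := hinv x (List.mem_cons_self ..)
      have hs1 := pvM_fresh subs libs res x (xs' ++ v :: ys) hxU hx
      have hs2 := pvM_fresh subs libs res x (xs' ++ ys) hxU hx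
      have hv' : v ∈ res ++ [x] ∨ v ∈ xs' := by
        rcases hv with h | h
        · exact Or.inl (List.mem_append.mpr (Or.inl h))
        · rcases List.mem_cons.mp h with rfl | h'
          · exact Or.inl (by simp)
          · exact Or.inr h'
      have heq1 : (xs' ++ v :: ys) ++ (List.lookup x subs).getD []
          = xs' ++ v :: (ys ++ (List.lookup x subs).getD []) := by simp
      have heq2 : (xs' ++ ys) ++ (List.lookup x subs).getD []
          = xs' ++ (ys ++ (List.lookup x subs).getD []) := by simp
      rw [heq1, heq2]
      refine ih f' g' (res ++ [x]) (ys ++ (List.lookup x subs).getD []) v ?_ hv' ?_ ?_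
      · intro z hz
        simp only [List.mem_append, List.mem_cons] at hz
        rcases hz with h | h | h | h
        · exact hinv' z (by simp [h])
        · exact hinv' z (by simp [h])
        · exact hinv' z (by simp [h])
        · exact pv_ch_mem_U subs libs x z h
      · rw [← heq1]; omega
      · rw [← heq2]; omega

-- appending children with per-layer dedup (pvAddNew) gives the same run as appending them raw
theorem pv_runB_addNew (subs : List (String × List String)) (libs : List String) :
    ∀ (nex : List String) (sec pre res : List String) (f g : Nat),
      pvInv subs libs (pre ++ sec ++ nex) →
      pvM subs libs res (pre ++ sec ++ nex) ≤ f →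
      pvM subs libs res (pre ++ pvAddNew sec nex) ≤ g →
      pvRunB subs f res (pre ++ sec ++ nex) = pvRunB subs g res (pre ++ pvAddNew sec nex) := by
  intro nex
  induction nex with
  | nil =>
    intro sec pre res f g hinv hf hg
    simp only [List.append_nil] at hinv hf ⊢
    exact pv_runB_agree subs libs f g res (pre ++ sec)
      (by simpa using hinv) (by simpa using hf) (by simpa [pvAddNew] using hg)
  | cons c cs ih =>
    intro sec pre res f g hinv hf hg
    by_cases hc : c ∈ sec
    · have hAdd : pvAddNew sec (c :: cs) = pvAddNew sec cs := by simp [pvAddNew, hc]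
      rw [hAdd] at hg ⊢
      have hdrop := pv_runB_dup subs libs (pre ++ sec) f
        (pvM subs libs res ((pre ++ sec) ++ cs)) res cs c hinv
        (Or.inr (List.mem_append.mpr (Or.inr hc))) hf le_rfl
      rw [hdrop]
      refine ih sec pre res _ g ?_ le_rfl hg
      intro z hz
      apply hinv z
      simp only [List.append_assoc, List.mem_append] at hz ⊢
      rcases hz with h | h | h
      · exact Or.inl h
      · exact Or.inr (Or.inl h)
      · exact Or.inr (Or.inr (List.mem_cons_of_mem _ h))
    · have hAdd : pvAddNew sec (c :: cs) = pvAddNew (sec ++ [c]) cs := by simp [pvAddNew, hc]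
      have heq : pre ++ sec ++ (c :: cs) = pre ++ (sec ++ [c]) ++ cs := by simp
      rw [hAdd] at hg ⊢
      rw [heq] at hinv hf ⊢
      exact ih (sec ++ [c]) pre res f g hinv hf hg

-- elements produced by pvAddNew come from its two arguments
theorem pv_mem_addNew (sec nex : List String) (x : String) (h : x ∈ pvAddNew sec nex) :
    x ∈ sec ∨ x ∈ nex := by
  induction nex generalizing sec with
  | nil => exact Or.inl h
  | cons c cs ih =>
    simp only [pvAddNew, List.foldl_cons] at h
    by_cases hc : c ∈ sec
    · rw [if_pos hc] at h
      rcases ih sec h with h' | h'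
      · exact Or.inl h'
      · exact Or.inr (List.mem_cons_of_mem _ h')
    · rw [if_neg hc] at h
      rcases ih (sec ++ [c]) h with h' | h'
      · rcases List.mem_append.mp h' with h'' | h''
        · exact Or.inl h''
        · exact Or.inr (by simp at h''; simp [h''])
      · exact Or.inr (List.mem_cons_of_mem _ h')

-- a full layer of A equals B consuming the layer from the queue front
theorem pv_runB_layer (subs : List (String × List String)) (libs : List String) :
    ∀ (first res sec : List String) (f : Nat),
      pvInv subs libs (first ++ sec) →
      pvM subs libs res (first ++ sec) ≤ f →
      pvRunB subs f res (first ++ sec) =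
        pvRunB subs
          (pvM subs libs (first.foldl (pvStepA subs) (res, sec)).1
            (first.foldl (pvStepA subs) (res, sec)).2)
          (first.foldl (pvStepA subs) (res, sec)).1
          (first.foldl (pvStepA subs) (res, sec)).2 := by
  intro first
  induction first with
  | nil =>
    intro res sec f hinv hf
    simp only [List.nil_append, List.foldl_nil] at *
    exact pv_runB_agree subs libs f _ res sec hinv hf le_rfl
  | cons v first' ih =>
    intro res sec f hinv hf
    simp only [List.cons_append] at hinv hf ⊢
    have hm1 : 1 ≤ pvM subs libs res (v :: (first' ++ sec)) := by simp [pvM]; omega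
    obtain ⟨f', rfl⟩ : ∃ f', f = f' + 1 := ⟨f - 1, by omega⟩
    rw [pvRunB]
    simp only [List.foldl_cons]
    have hinv' : pvInv subs libs (first' ++ sec) :=
      fun z hz => hinv z (List.mem_cons_of_mem _ hz)
    by_cases hv : v ∈ res
    · simp only [hv, if_true, pvStepA]
      exact ih res sec f' hinv' (by rw [pvM_cons] at hf; omega)
    · simp only [hv, if_false]
      have hvU : v ∈ pvU subs libs := hinv v (List.mem_cons_self ..)
      have hstep := pvM_fresh subs libs res v (first' ++ sec) hvU hv
      cases hl : List.lookup v subs with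
      | none =>
        rw [hl] at hstep
        simp only [Option.getD_none, List.append_nil] at hstep
        have hstA : pvStepA subs (res, sec) v = (res ++ [v], sec) := by
          simp [pvStepA, hv, hl]
        rw [hstA]
        simp only [Option.getD_none, List.append_nil]
        exact ih (res ++ [v]) sec f' hinv' (by omega)
      | some nex =>
        rw [hl] at hstep
        simp only [Option.getD_some] at hstep
        have hstA : pvStepA subs (res, sec) v = (res ++ [v], pvAddNew sec nex) := by
          simp [pvStepA, hv, hl]
        rw [hstA]
        simp only [Option.getD_some]
        have hinv2 : pvInv subs libs (first' ++ sec ++ nex) := by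
          intro z hz
          simp only [List.append_assoc, List.mem_append] at hz
          rcases hz with h | h | h
          · exact hinv' z (List.mem_append.mpr (Or.inl h))
          · exact hinv' z (List.mem_append.mpr (Or.inr h))
          · exact pv_ch_mem_U subs libs v z (by simp [hl, h])
        have hfb : pvM subs libs (res ++ [v]) (first' ++ sec ++ nex) ≤ f' := by omega
        have hAdd := pv_runB_addNew subs libs nex sec first' (res ++ [v]) f'
          (pvM subs libs (res ++ [v]) (first' ++ pvAddNew sec nex)) hinv2 hfb le_rfl
        rw [hAdd]
        refine ih (res ++ [v]) (pvAddNew sec nex) _ ?_ le_rfl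
        intro z hz
        rcases List.mem_append.mp hz with h | h
        · exact hinv' z (List.mem_append.mpr (Or.inl h))
        · rcases pv_mem_addNew sec nex z h with h' | h'
          · exact hinv' z (List.mem_append.mpr (Or.inr h'))
          · exact pv_ch_mem_U subs libs v z (by simp [hl, h'])

-- if nothing in the layer is fresh, A's fold leaves the state unchanged
theorem pv_foldl_stale (subs : List (String × List String)) :
    ∀ (first res sec : List String), (∀ v ∈ first, v ∈ res) →
      first.foldl (pvStepA subs) (res, sec) = (res, sec) := by
  intro first
  induction first with
  | nil => intro res sec _; rfl
  | cons v first' ih =>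
    intro res sec h
    simp only [List.foldl_cons, pvStepA, if_pos (h v (List.mem_cons_self ..))]
    exact ih res sec (fun z hz => h z (List.mem_cons_of_mem _ hz))

-- A's fold only ever appends to the result
theorem pv_foldl_res_mono (subs : List (String × List String)) :
    ∀ (first res sec : List String) (x : String), x ∈ res →
      x ∈ (first.foldl (pvStepA subs) (res, sec)).1 := by
  intro first
  induction first with
  | nil => intro res sec x hx; exact hx
  | cons v first' ih =>
    intro res sec x hx
    simp only [List.foldl_cons]
    by_cases hv : v ∈ res
    · simp only [pvStepA, if_pos hv]; exact ih res sec x hx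
    · have : x ∈ res ++ [v] := List.mem_append.mpr (Or.inl hx)
      cases hl : List.lookup v subs with
      | none => simp only [pvStepA, if_neg hv, hl]; exact ih _ _ x this
      | some nex => simp only [pvStepA, if_neg hv, hl]; exact ih _ _ x this

-- every processed layer element ends up in the result
theorem pv_foldl_res_covers (subs : List (String × List String)) :
    ∀ (first res sec : List String) (x : String), x ∈ first →
      x ∈ (first.foldl (pvStepA subs) (res, sec)).1 := by
  intro first
  induction first with
  | nil => intro res sec x hx; simp at hx
  | cons v first' ih =>
    intro res sec x hx
    simp only [List.foldl_cons]
    rcases List.mem_cons.mp hx with rfl | hx'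
    · by_cases hv : x ∈ res
      · simp only [pvStepA, if_pos hv]; exact pv_foldl_res_mono subs first' res sec x hv
      · have hx2 : x ∈ res ++ [x] := by simp
        cases hl : List.lookup x subs with
        | none => simp only [pvStepA, if_neg hv, hl]; exact pv_foldl_res_mono subs first' _ _ x hx2
        | some nex => simp only [pvStepA, if_neg hv, hl]; exact pv_foldl_res_mono subs first' _ _ x hx2
    · exact ih _ _ x hx'

-- elements of the produced second frontier come from the old one or from subs' values
theorem pv_foldl_sec_sub (subs : List (String × List String)) :
    ∀ (first res sec : List String) (x : String),
      x ∈ (first.foldl (pvStepA subs) (res, sec)).2 →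
      x ∈ sec ∨ x ∈ subs.flatMap (fun p => p.2) := by
  intro first
  induction first with
  | nil => intro res sec x hx; exact Or.inl hx
  | cons v first' ih =>
    intro res sec x hx
    simp only [List.foldl_cons] at hx
    by_cases hv : v ∈ res
    · rw [show pvStepA subs (res, sec) v = (res, sec) from by simp [pvStepA, hv]] at hx
      exact ih res sec x hx
    · cases hl : List.lookup v subs with
      | none =>
        rw [show pvStepA subs (res, sec) v = (res ++ [v], sec) from by
          simp [pvStepA, hv, hl]] at hx
        exact ih _ sec x hx
      | some nex =>
        rw [show pvStepA subs (res, sec) v = (res ++ [v], pvAddNew sec nex) from by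
          simp [pvStepA, hv, hl]] at hx
        rcases ih _ _ x hx with h | h
        · rcases pv_mem_addNew sec nex x h with h' | h'
          · exact Or.inl h'
          · refine Or.inr ?_
            have := pv_lookup_mem_snd subs v nex hl
            simp only [List.mem_map] at this
            obtain ⟨p, hp, rfl⟩ := this
            exact List.mem_flatMap.mpr ⟨p, hp, h'⟩
        · exact Or.inr h

-- main bisimulation: A's layered loop equals B's queue loop
theorem pv_runAB (subs : List (String × List String)) (libs : List String) :
    ∀ (fA : Nat) (res first : List String) (fB : Nat),
      pvInv subs libs first →
      ((pvU subs libs) \ res.toFinset).card + 2 ≤ fA →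
      pvM subs libs res first ≤ fB →
      pvRunA subs fA res first = pvRunB subs fB res first := by
  intro fA
  induction fA with
  | zero => intro res first fB _ hA _; omega
  | succ fA' ih =>
    intro res first fB hinv hA hB
    cases first with
    | nil =>
      rw [pv_runB_nil, pvRunA]
      simp
    | cons v first' =>
      rw [pvRunA]
      simp only [List.isEmpty_cons, if_false, Bool.false_eq_true]
      have hinv0 : pvInv subs libs ((v :: first') ++ []) := by simpa using hinv
      have hB0 : pvM subs libs res ((v :: first') ++ []) ≤ fB := by simpa using hB
      have hlayer := pv_runB_layer subs libs (v :: first') res [] fB hinv0 hB0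
      rw [show (v :: first') ++ ([] : List String) = v :: first' from by simp] at hlayer
      rw [hlayer]
      set st := (v :: first').foldl (pvStepA subs) (res, []) with hst
      have hinv2 : pvInv subs libs st.2 := by
        intro z hz
        rcases pv_foldl_sec_sub subs (v :: first') res [] z hz with h | h
        · simp at h
        · simp [pvU, List.mem_toFinset, h]
      by_cases hall : ∀ x ∈ v :: first', x ∈ res
      · have hstale : st = (res, []) := pv_foldl_stale subs (v :: first') res [] hall
        rw [hstale]
        simp only [pv_runB_nil]
        cases fA' with
        | zero => rfl
        | succ n => rw [pvRunA]; simp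
      · push Not at hall
        obtain ⟨x, hx, hxres⟩ := hall
        have hxU : x ∈ pvU subs libs := hinv x hx
        have hxst : x ∈ st.1 := pv_foldl_res_covers subs (v :: first') res [] x hx
        have hmono : ∀ z ∈ res, z ∈ st.1 := fun z hz => pv_foldl_res_mono subs _ res [] z hz
        have hcard : ((pvU subs libs) \ st.1.toFinset).card + 1
            ≤ ((pvU subs libs) \ res.toFinset).card := by
          have hsub : (pvU subs libs) \ st.1.toFinset
              ⊆ ((pvU subs libs) \ res.toFinset).erase x := by
            intro z hz
            simp only [Finset.mem_sdiff, List.mem_toFinset] at hz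
            simp only [Finset.mem_erase, Finset.mem_sdiff, List.mem_toFinset]
            refine ⟨fun hzx => hz.2 (hzx ▸ hxst), hz.1, fun hzr => hz.2 (hmono z hzr)⟩
          calc ((pvU subs libs) \ st.1.toFinset).card + 1
              ≤ (((pvU subs libs) \ res.toFinset).erase x).card + 1 :=
                Nat.add_le_add_right (Finset.card_le_card hsub) 1
            _ = ((pvU subs libs) \ res.toFinset).card :=
                Finset.card_erase_add_one (by simp [Finset.mem_sdiff, hxU, hxres])
        exact ih st.1 st.2 _ hinv2 (by omega) le_rfl

-- ===== VERDICT (by name: the statement is the Claim_ definition above) =====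
theorem collect_unique_libs_spec : Claim_equal_collect_unique_libs := by
  intro subs libs _
  show collect_unique_libs subs libs = collect_unique_libs_alt subs libs
  unfold collect_unique_libs collect_unique_libs_alt
  have hinv : pvInv subs libs libs := by
    intro v hv; simp [pvU, List.mem_toFinset, hv]
  have hcardU : (pvU subs libs).card ≤ libs.length + pvSubTotal subs := by
    calc (pvU subs libs).card ≤ (libs ++ subs.flatMap (fun p => p.2)).length :=
          List.toFinset_card_le _
      _ = libs.length + pvSubTotal subs := by
          simp [List.length_append, List.length_flatMap, pvSubTotal]
  have hA : ((pvU subs libs) \ ([] : List String).toFinset).card + 2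
      ≤ libs.length + pvSubTotal subs + 2 := by
    simp only [List.toFinset_nil, Finset.sdiff_empty]
    omega
  have hB : pvM subs libs [] libs
      ≤ (pvSubTotal subs + 1) * (libs.length + pvSubTotal subs + 1) + libs.length + 1 := by
    simp only [pvM, List.toFinset_nil, Finset.sdiff_empty]
    have h1 : (pvSubTotal subs + 1) * (pvU subs libs).card
        ≤ (pvSubTotal subs + 1) * (libs.length + pvSubTotal subs + 1) :=
      Nat.mul_le_mul_left _ (by omega)
    omega
  exact pv_runAB subs libs _ [] libs _ hinv hA hB
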